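-- pv_equiv track=rewrite | github.com/tapiokazaki/MusicTransformer | mortm/custom_token.py | parse_chord
-- ===== SOURCE A (Python) =====
-- roots = ['C', 'C#', 'D', 'D#', 'E', 'E#', 'F', 'F#', 'G', 'G#', 'A', 'A#', 'B', 'Cb','Db','Eb','Fb','Gb','Ab','Bb']
--
-- qualities = [
--     'None', 'm', '7', 'maj7', 'm7', 'dim', 'aug', "m7b5", "b5",
--     'sus2', 'sus4', '6', 'm6', '9', 'maj9', 'm9', '11', '13', 'add9'
-- ]
--
-- def parse_chord(chord: str):
--     """
--     コード文字列を root, quality, base に分解する。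
--     例: "Em/G" -> ("E", "m", "/G")
--     """
--     # 1) ベース音の抽出（"/" 以下を base とする）
--     if '/' in chord:
--         core, bass_note = chord.split('/', 1)
--         base = '/' + bass_note
--     else:
--         core = chord
--         base = 'None'  # ベースなしの場合は空文字
--
--     # 2) ルートの抽出（シャープ付きを優先）
--     #    roots を長さ順にソートして先にマッチさせる
--     sorted_roots = sorted(roots, key=lambda x: -len(x))
--     for r in sorted_roots:
--         if core.startswith(r):
--             root = r
--             quality = core[len(r):] or 'None'
--             break
--     else:
--         raise ValueError(f"Unknown root in chord '{chord}'")
--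
--     # 3) クオリティがリスト外なら 'None' にフォールバック
--     if quality not in qualities:
--         quality = 'None'
--
--     return root, quality, base
-- ===== SOURCE B (Python) =====
-- roots = ['C', 'C#', 'D', 'D#', 'E', 'E#', 'F', 'F#', 'G', 'G#', 'A', 'A#', 'B', 'Cb','Db','Eb','Fb','Gb','Ab','Bb']
--
-- qualities = [
--     'None', 'm', '7', 'maj7', 'm7', 'dim', 'aug', "m7b5", "b5",
--     'sus2', 'sus4', '6', 'm6', '9', 'maj9', 'm9', '11', '13', 'add9'
-- ]
--
-- _root_set = frozenset(roots)
--
-- def parse_chord(chord: str):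
--     # bass split kept as in the original
--     if '/' in chord:
--         core, bass_note = chord.split('/', 1)
--         base = '/' + bass_note
--     else:
--         core = chord
--         base = 'None'
--     # direct fixed-length prefix lookup: 2-char prefix first, then 1-char
--     if core[:2] in _root_set:
--         root = core[:2]
--     elif core[:1] in _root_set:
--         root = core[:1]
--     else:
--         raise ValueError(f"Unknown root in chord '{chord}'")
--     quality = core[len(root):] or 'None'
--     if quality not in qualities:
--         quality = 'None'
--     return root, quality, base
-- ===== Notes on version B (the rewrite author's own statement) =====
-- stated objective: idiomatic
-- what changed: Root extraction replaces A's sort-by-descending-length plus linear startswith scan over all 20 roots with two direct fixed-length prefix lookups (2-char prefix in a set, falling back to the 1-char prefix); the bass split is kept unchanged.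
import Mathlib
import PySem

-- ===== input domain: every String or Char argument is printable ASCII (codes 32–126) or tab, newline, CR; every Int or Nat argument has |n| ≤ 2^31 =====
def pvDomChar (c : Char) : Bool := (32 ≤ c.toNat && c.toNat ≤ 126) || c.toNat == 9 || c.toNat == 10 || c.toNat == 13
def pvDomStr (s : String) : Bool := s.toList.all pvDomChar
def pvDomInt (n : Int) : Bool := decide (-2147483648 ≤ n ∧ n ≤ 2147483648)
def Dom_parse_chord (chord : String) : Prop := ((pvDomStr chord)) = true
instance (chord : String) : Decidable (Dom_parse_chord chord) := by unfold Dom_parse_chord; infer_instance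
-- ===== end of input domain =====

-- B keeps A's bass split but replaces the sort-longest-first startswith scan over all roots
-- with two direct fixed-length prefix lookups (objective: idiomatic).

-- module constants (shared by both programs), as lists of code points
def pyRootsC : List (List Char) :=
  [['C'], ['C','#'], ['D'], ['D','#'], ['E'], ['E','#'], ['F'], ['F','#'], ['G'], ['G','#'],
   ['A'], ['A','#'], ['B'], ['C','b'], ['D','b'], ['E','b'], ['F','b'], ['G','b'], ['A','b'], ['B','b']]

def pyQualitiesC : List (List Char) :=
  [['N','o','n','e'], ['m'], ['7'], ['m','a','j','7'], ['m','7'], ['d','i','m'], ['a','u','g'],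
   ['m','7','b','5'], ['b','5'], ['s','u','s','2'], ['s','u','s','4'], ['6'], ['m','6'], ['9'],
   ['m','a','j','9'], ['m','9'], ['1','1'], ['1','3'], ['a','d','d','9']]

-- step 1) of both programs (identical source lines in A and in B): split off the bass
def splitCB (chord : String) : List Char × List Char :=
  let cs := chord.toList
  if PySem.Chars.isIn ['/'] cs then
    match PySem.Chars.splitOnMax cs ['/'] 1 with
    | [c, b] => (c, '/' :: b)            -- core, '/' + bass_note
    | _ => (cs, ['N','o','n','e'])       -- unreachable: sep present ⇒ exactly two parts
  else (cs, ['N','o','n','e'])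

-- ===== PORT A =====
-- A's for-loop over sorted_roots with break/else: first r with core.startswith(r) gives
-- (r, core[len(r):] or 'None'); none = the loop fell through (Python raises ValueError).
def findRootQualA (core : List Char) : List (List Char) → Option (List Char × List Char)
  | [] => none
  | r :: rs =>
    if PySem.Chars.startswith core r then
      some (r, (if PySem.List.slice core (some (r.length : Int)) none = []
                then ['N','o','n','e']
                else PySem.List.slice core (some (r.length : Int)) none))
    else findRootQualA core rs

-- steps 2)+3) of A on the already-split core, plus assembling the result triple
def tailA (core base : List Char) : String × String × String :=
  match findRootQualA core (PySem.List.sorted pyRootsC (fun x => -(x.length : Int)) false) with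
  | some rq =>
    (String.ofList rq.1,
     String.ofList (if pyQualitiesC.contains rq.2 then rq.2 else ['N','o','n','e']),
     String.ofList base)
  | none => ("", "", "")                 -- Python raises ValueError here (outside Pre_)

def parse_chord (chord : String) : String × String × String :=
  tailA (splitCB chord).1 (splitCB chord).2

-- ===== PORT B =====
-- direct fixed-length prefix lookup: core[:2] in the root set, else core[:1], else raise
def rootB (core : List Char) : Option (List Char) :=
  if pyRootsC.contains (PySem.List.slice core none (some 2)) then
    some (PySem.List.slice core none (some 2))
  else if pyRootsC.contains (PySem.List.slice core none (some 1)) then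
    some (PySem.List.slice core none (some 1))
  else none

def tailB (core base : List Char) : String × String × String :=
  match rootB core with
  | some root =>
    (String.ofList root,
     String.ofList
       (if pyQualitiesC.contains
            (if PySem.List.slice core (some (root.length : Int)) none = []
             then ['N','o','n','e']
             else PySem.List.slice core (some (root.length : Int)) none)
        then (if PySem.List.slice core (some (root.length : Int)) none = []
              then ['N','o','n','e']
              else PySem.List.slice core (some (root.length : Int)) none)
        else ['N','o','n','e']),
     String.ofList base)
  | none => ("", "", "")                 -- Python raises ValueError here (outside Pre_)

def parse_chord_alt (chord : String) : String × String × String :=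
  tailB (splitCB chord).1 (splitCB chord).2

-- ===== PRECONDITION & SPEC =====
-- Pre_ excludes exactly the inputs on which both Pythons raise ValueError: those whose core
-- (the part before the bass separator, if any) starts with no valid root name.
def Pre_parse_chord (chord : String) : Prop :=
  pyRootsC.contains ((chord.toList.takeWhile (· ≠ '/')).take 2) = true ∨
  pyRootsC.contains ((chord.toList.takeWhile (· ≠ '/')).take 1) = true
instance (chord : String) : Decidable (Pre_parse_chord chord) := by unfold Pre_parse_chord; infer_instance
def pvWitness_parse_chord : String := "Em/G"

def Spec_parse_chord (chord : String) (out : String × String × String) : Prop := out = parse_chord_alt chord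
instance (chord : String) (out : String × String × String) : Decidable (Spec_parse_chord chord out) := by unfold Spec_parse_chord; infer_instance

-- ===== CLAIM (what is proved, stated in full; the proofs are below) =====
def Claim_equal_parse_chord : Prop := ∀ (chord : String), Dom_parse_chord chord → Pre_parse_chord chord → Spec_parse_chord chord (parse_chord chord)

-- ===== LEMMAS AND PROOFS =====

-- the quality A computes for a root of length n
def qualA (core : List Char) (n : Nat) : List Char :=
  if PySem.List.slice core (some (n : Int)) none = []
  then ['N','o','n','e'] else PySem.List.slice core (some (n : Int)) none

theorem startswith_iff_take (core r : List Char) :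
    PySem.Chars.startswith core r = true ↔ core.take r.length = r := by
  rw [PySem.Chars.startswith_iff, List.prefix_iff_eq_take, eq_comm]

-- scanning a block of roots that all have length n matches exactly core.take n
theorem findA_append (core : List Char) (n : Nat) :
    ∀ (L M : List (List Char)), (∀ r ∈ L, r.length = n) →
    findRootQualA core (L ++ M) =
      if core.take n ∈ L then some (core.take n, qualA core n)
      else findRootQualA core M := by
  intro L
  induction L with
  | nil =>
    intro M h
    simp only [List.nil_append, List.not_mem_nil, if_false]
  | cons r L ih =>
    intro M h
    have hr : r.length = n := h r (by simp)
    by_cases hs : core.take n = r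
    · have hsw : PySem.Chars.startswith core r = true := by
        rw [startswith_iff_take, hr]; exact hs
      simp only [List.cons_append, findRootQualA, hsw, if_true, hr, qualA]
      rw [if_pos (show core.take n ∈ r :: L from by rw [hs]; exact List.mem_cons_self ..), hs]
    · have hsw : PySem.Chars.startswith core r = false := by
        rw [Bool.eq_false_iff]
        intro hc
        exact hs (hr ▸ (startswith_iff_take core r).mp hc)
      simp only [List.cons_append, findRootQualA, hsw, Bool.false_eq_true, if_false,
        List.mem_cons, hs, false_or]
      exact ih M (fun x hm => h x (List.mem_cons_of_mem _ hm))

theorem findA_sorted (core : List Char) :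
    findRootQualA core (PySem.List.sorted pyRootsC (fun x => -(x.length : Int)) false) =
      if core.take 2 ∈ [['C','#'], ['D','#'], ['E','#'], ['F','#'], ['G','#'], ['A','#'],
          ['C','b'], ['D','b'], ['E','b'], ['F','b'], ['G','b'], ['A','b'], ['B','b']]
      then some (core.take 2, qualA core 2)
      else if core.take 1 ∈ [['C'], ['D'], ['E'], ['F'], ['G'], ['A'], ['B']]
      then some (core.take 1, qualA core 1)
      else none := by
  have hs : PySem.List.sorted pyRootsC (fun x => -(x.length : Int)) false =
      [['C','#'], ['D','#'], ['E','#'], ['F','#'], ['G','#'], ['A','#'],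
       ['C','b'], ['D','b'], ['E','b'], ['F','b'], ['G','b'], ['A','b'], ['B','b']] ++
      ([['C'], ['D'], ['E'], ['F'], ['G'], ['A'], ['B']] ++ []) := by decide
  rw [hs, findA_append core 2 _ _ (by decide), findA_append core 1 _ _ (by decide)]
  rfl

set_option maxHeartbeats 1000000 in
theorem tails_eq (core base : List Char) : tailA core base = tailB core base := by
  unfold tailA tailB
  rw [findA_sorted]
  unfold rootB
  match core with
  | [] => simp [pyRootsC, PySem.List.slice]
  | [a] =>
    have h2 : PySem.List.slice [a] none (some 2) = [a] := by
      rw [PySem.List.slice_to] <;> norm_num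
    have h1 : PySem.List.slice [a] none (some 1) = [a] := by
      rw [PySem.List.slice_to] <;> norm_num
    have f2 : ([a] ∈ pyRootsC) ↔
        ([a] ∈ [['C'], ['D'], ['E'], ['F'], ['G'], ['A'], ['B']]) := by
      simp [pyRootsC]
    rw [h2, h1, if_neg (by simp)]
    simp only [List.take_succ_cons, List.take_nil, List.contains_eq_mem, decide_eq_true_eq, f2]
    by_cases hB : [a] ∈ [['C'], ['D'], ['E'], ['F'], ['G'], ['A'], ['B']]
    · rw [if_pos hB, if_pos hB]
      try simp [qualA]
    · rw [if_neg hB, if_neg hB, if_neg hB]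
  | a :: b :: rest =>
    have h2 : PySem.List.slice (a :: b :: rest) none (some 2) = [a, b] := by
      rw [PySem.List.slice_to] <;> simp
    have h1 : PySem.List.slice (a :: b :: rest) none (some 1) = [a] := by
      rw [PySem.List.slice_to] <;> simp
    have f1 : ([a, b] ∈ pyRootsC) ↔
        ([a, b] ∈ [['C','#'], ['D','#'], ['E','#'], ['F','#'], ['G','#'], ['A','#'],
          ['C','b'], ['D','b'], ['E','b'], ['F','b'], ['G','b'], ['A','b'], ['B','b']]) := by
      simp [pyRootsC]
    have f2 : ([a] ∈ pyRootsC) ↔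
        ([a] ∈ [['C'], ['D'], ['E'], ['F'], ['G'], ['A'], ['B']]) := by
      simp [pyRootsC]
    rw [h2, h1]
    simp only [List.take_succ_cons, List.take_zero, List.contains_eq_mem,
      decide_eq_true_eq, f1, f2]
    by_cases hA : [a, b] ∈ [['C','#'], ['D','#'], ['E','#'], ['F','#'], ['G','#'], ['A','#'],
        ['C','b'], ['D','b'], ['E','b'], ['F','b'], ['G','b'], ['A','b'], ['B','b']]
    · rw [if_pos hA, if_pos hA]
      try simp [qualA]
    · rw [if_neg hA, if_neg hA]
      by_cases hB : [a] ∈ [['C'], ['D'], ['E'], ['F'], ['G'], ['A'], ['B']]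
      · rw [if_pos hB, if_pos hB]
        try simp [qualA]
      · rw [if_neg hB, if_neg hB]
        try rfl

-- ===== VERDICT (by name: the statement is the Claim_ definition above) =====
theorem parse_chord_spec : Claim_equal_parse_chord := by
  intro chord _ _
  unfold Spec_parse_chord parse_chord parse_chord_alt
  exact tails_eq _ _
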